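-- pv_equiv track=rewrite | github.com/gedwards09/advent-of-code | 2024/day-4.py | substringOrReverseSubstringCount
-- ===== SOURCE A (Python) =====
-- def substringOrReverseSubstringCount(sInput, sSearchWord):
--     iSzInput = len(sInput)
--     iSzSearchWord = len(sSearchWord)
--     sReverseSearchWord = sSearchWord[::-1]
--     ct = 0
--     i = 0
--     while i < iSzInput:
--         j = getMatchSubstringCharacterCount(sInput, iSzInput, sSearchWord, iSzSearchWord, iStartIndex=i)
--         if j == 0:
--             j = getMatchSubstringCharacterCount(sInput, iSzInput, sReverseSearchWord, iSzSearchWord, iStartIndex=i)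
--         if j == iSzSearchWord:
--             # match!
--             ct += 1
--             # increment 1 less because reverse string can start on the last letter
--             i += j - 1
--         else:
--             i += j
--             if j == 0:
--                 i += 1
--     return ct
--
-- def getMatchSubstringCharacterCount(sInput, iSzInput, sSearchWord, iSzSearchWord, iStartIndex):
--     j = 0
--     while j < iSzSearchWord and iStartIndex + j < iSzInput\
--         and sInput[iStartIndex + j] == sSearchWord[j]:
--         j += 1
--     return j
-- ===== SOURCE B (Python) =====
-- def substringOrReverseSubstringCount(sInput, sSearchWord):
--     n = len(sSearchWord)
--     L = len(sInput)
--     rev = sSearchWord[::-1]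
--     F = _matchStats(sInput, sSearchWord)
--     R = _matchStats(sInput, rev)
--     ct = 0
--     i = 0
--     while i < L:
--         j = F[i]
--         if j == 0:
--             j = R[i]
--         if j == n:
--             ct += 1
--             i += j - 1
--         else:
--             i += j
--             if j == 0:
--                 i += 1
--     return ct
--
-- def _matchStats(s, w):
--     # Z-style matching statistics: F[i] = longest common prefix of s[i:] and w,
--     # computed in O(len(s)) via the [l, r) match window, after an O(len(w)^2)
--     # Z-array of the (short) pattern itself.
--     L = len(s)
--     n = len(w)
--     z = [_lcp(w, k) for k in range(n)]
--     F = []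
--     l = r = 0
--     for i in range(L):
--         if i < r and z[i - l] < r - i:
--             F.append(z[i - l])
--         else:
--             l = i
--             if r < i:
--                 r = i
--             while r < L and r - l < n and s[r] == w[r - l]:
--                 r += 1
--             F.append(r - l)
--     return F
--
-- def _lcp(w, k):
--     j = 0
--     while k + j < len(w) and j < len(w) and w[k + j] == w[j]:
--         j += 1
--     return j
-- ===== Notes on version B (the rewrite author's own statement) =====
-- stated objective: alternative
-- what changed: A compares characters on the fly at every visited position with an inner matching loop; B precomputes Z-style matching-statistics tables (longest common prefix of every suffix of the input with the word and with its reverse) via the [l,r) match-window technique, then replays the counting walk with O(1) table lookups.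
import Mathlib
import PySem

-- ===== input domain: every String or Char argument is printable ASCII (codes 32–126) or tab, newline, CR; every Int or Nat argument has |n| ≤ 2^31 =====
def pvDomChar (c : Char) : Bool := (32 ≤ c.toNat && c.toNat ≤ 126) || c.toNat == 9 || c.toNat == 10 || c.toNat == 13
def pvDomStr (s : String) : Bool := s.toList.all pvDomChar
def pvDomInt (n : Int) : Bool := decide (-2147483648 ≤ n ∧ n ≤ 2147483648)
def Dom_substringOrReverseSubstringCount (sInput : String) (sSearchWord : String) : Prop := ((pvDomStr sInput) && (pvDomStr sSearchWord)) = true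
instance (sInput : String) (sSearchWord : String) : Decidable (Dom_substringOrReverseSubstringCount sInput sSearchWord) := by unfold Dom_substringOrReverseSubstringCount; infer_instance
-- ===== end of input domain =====

-- B replaces A's per-position character-matching scan by Z-style matching-statistics
-- tables (one per direction) computed once with the [l,r) match-window technique, then
-- replays the counting walk with O(1) table lookups (objective: alternative algorithm).

-- ===== PORT A =====
-- inner while-loop of getMatchSubstringCharacterCount (sizes inlined; loop indices stay
-- Nat — they are non-negative throughout every terminating run of the Python)
def pvAMatchLoop (s w : List Char) (i j : Nat) : Nat :=
  if h : j < w.length ∧ i + j < s.length ∧ s[i + j]? = w[j]? then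
    pvAMatchLoop s w i (j + 1)
  else j
termination_by w.length - j
decreasing_by have := h.1; omega

-- the main while-loop of A; fuel = len(sInput) + 1 bounds the iteration count of every
-- terminating run (each step advances i by at least 1 when A terminates)
def pvAGo (s w rw : List Char) (n : Nat) (fuel i : Nat) (ct : Int) : Int :=
  match fuel with
  | 0 => ct
  | fuel + 1 =>
    if i < s.length then
      let j0 := pvAMatchLoop s w i 0
      let j := if j0 = 0 then pvAMatchLoop s rw i 0 else j0
      if j = n then pvAGo s w rw n fuel (i + j - 1) (ct + 1)
      else pvAGo s w rw n fuel (i + j + (if j = 0 then 1 else 0)) ct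
    else ct

def substringOrReverseSubstringCount (sInput : String) (sSearchWord : String) : Int :=
  let s := sInput.toList
  let w := sSearchWord.toList
  -- sSearchWord[::-1] is exactly List.reverse
  pvAGo s w w.reverse w.length (s.length + 1) 0 0

-- ===== PORT B =====
-- _lcp(w, k): naive Z-value of the (short) pattern at shift k
def pvBLcpLoop (w : List Char) (k j : Nat) : Nat :=
  if h : k + j < w.length ∧ j < w.length ∧ w[k + j]? = w[j]? then
    pvBLcpLoop w k (j + 1)
  else j
termination_by w.length - j
decreasing_by have := h.2.1; omega

-- the window-extension while-loop inside _matchStats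
def pvBExtLoop (s w : List Char) (l r : Nat) : Nat :=
  if h : r < s.length ∧ r - l < w.length ∧ s[r]? = w[r - l]? then
    pvBExtLoop s w l (r + 1)
  else r
termination_by s.length - r
decreasing_by have := h.1; omega

-- the `for i in range(L)` loop of _matchStats, carrying (l, r) and the growing table
def pvBMsLoop (s w : List Char) (z : List Nat) (i l r : Nat) (acc : List Nat) : List Nat :=
  if i < s.length then
    if i < r ∧ z.getD (i - l) 0 < r - i then
      pvBMsLoop s w z (i + 1) l r (acc ++ [z.getD (i - l) 0])
    else
      let r' := pvBExtLoop s w i (max r i)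
      pvBMsLoop s w z (i + 1) i r' (acc ++ [r' - i])
  else acc
termination_by s.length - i

def pvBMatchStats (s w : List Char) : List Nat :=
  pvBMsLoop s w ((List.range w.length).map (fun k => pvBLcpLoop w k 0)) 0 0 0 []

-- B's counting walk: same walk as A's, but j comes from the precomputed tables
def pvBGo (s : List Char) (n : Nat) (F R : List Nat) (fuel i : Nat) (ct : Int) : Int :=
  match fuel with
  | 0 => ct
  | fuel + 1 =>
    if i < s.length then
      let j0 := F.getD i 0
      let j := if j0 = 0 then R.getD i 0 else j0
      if j = n then pvBGo s n F R fuel (i + j - 1) (ct + 1)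
      else pvBGo s n F R fuel (i + j + (if j = 0 then 1 else 0)) ct
    else ct

def substringOrReverseSubstringCount_alt (sInput : String) (sSearchWord : String) : Int :=
  let s := sInput.toList
  let w := sSearchWord.toList
  pvBGo s w.length (pvBMatchStats s w) (pvBMatchStats s w.reverse) (s.length + 1) 0 0

-- ===== PRECONDITION & SPEC =====
-- (no Pre_: the ports agree on ALL inputs.  Note: the Python A loops forever when the
-- search word is empty with non-empty input, or is a single character occurring in the
-- input; there both ports' fuel runs out at the same point, so they still agree.)
def Spec_substringOrReverseSubstringCount (sInput : String) (sSearchWord : String) (out : Int) : Prop := out = substringOrReverseSubstringCount_alt sInput sSearchWord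
instance (sInput : String) (sSearchWord : String) (out : Int) : Decidable (Spec_substringOrReverseSubstringCount sInput sSearchWord out) := by unfold Spec_substringOrReverseSubstringCount; infer_instance

-- ===== CLAIM (what is proved, stated in full; the proofs are below) =====
def Claim_equal_substringOrReverseSubstringCount : Prop := ∀ (sInput : String) (sSearchWord : String), Dom_substringOrReverseSubstringCount sInput sSearchWord → Spec_substringOrReverseSubstringCount sInput sSearchWord (substringOrReverseSubstringCount sInput sSearchWord)

-- ===== LEMMAS AND PROOFS =====

-- specification function: length of the longest common prefix of two lists
def cpl : List Char → List Char → Nat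
  | a :: x, b :: y => if a = b then cpl x y + 1 else 0
  | _, _ => 0

theorem cpl_nil_right (x : List Char) : cpl x [] = 0 := by
  cases x <;> rfl

theorem cpl_le_left (x y : List Char) : cpl x y ≤ x.length := by
  induction x generalizing y with
  | nil => simp [cpl]
  | cons a x ih =>
    cases y with
    | nil => simp [cpl]
    | cons b y =>
      simp only [cpl]
      split
      · simpa using ih y
      · simp

theorem cpl_le_right (x y : List Char) : cpl x y ≤ y.length := by
  induction x generalizing y with
  | nil => simp [cpl]
  | cons a x ih =>
    cases y with
    | nil => simp [cpl]
    | cons b y =>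
      simp only [cpl]
      split
      · simpa using ih y
      · simp

theorem take_eq_of_le_cpl (x y : List Char) (m : Nat) (h : m ≤ cpl x y) :
    x.take m = y.take m := by
  induction x generalizing y m with
  | nil => simp [cpl] at h; simp [h]
  | cons a x ih =>
    cases y with
    | nil => simp [cpl] at h; simp [h]
    | cons b y =>
      simp only [cpl] at h
      by_cases hab : a = b
      · rw [if_pos hab] at h
        cases m with
        | zero => simp
        | succ m => simp [hab, ih y m (by omega)]
      · simp [hab] at h; simp [h]

theorem cpl_take (x y : List Char) : x.take (cpl x y) = y.take (cpl x y) :=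
  take_eq_of_le_cpl x y _ le_rfl

-- cpl depends only on the first (cpl y w) + 1 elements of the left argument
theorem cpl_stable (y : List Char) : ∀ (x w : List Char) (m : Nat),
    x.take m = y.take m → cpl y w < m → cpl x w = cpl y w := by
  induction y with
  | nil =>
    intro x w m ht hm
    cases w with
    | nil => simp [cpl_nil_right]
    | cons c w =>
      simp only [cpl] at hm ⊢
      cases x with
      | nil => rfl
      | cons a x =>
        exfalso
        have : m ≠ 0 := by omega
        cases m with
        | zero => omega
        | succ m => simp at ht
  | cons b y ih =>
    intro x w m ht hm
    cases w with
    | nil => simp [cpl_nil_right]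
    | cons c w =>
      have hm0 : m ≠ 0 := by omega
      cases m with
      | zero => omega
      | succ m =>
        cases x with
        | nil => simp at ht
        | cons a x =>
          rw [List.take_succ_cons, List.take_succ_cons] at ht
          injection ht with hab ht
          subst hab
          simp only [cpl] at hm ⊢
          by_cases hbc : a = c
          · simp only [if_pos hbc] at hm ⊢
            have := ih x w m ht (by omega)
            omega
          · simp only [if_neg hbc]

-- characterization: prefix agreement plus a stopping reason pins down cpl
theorem cpl_eq_of_stop : ∀ (m : Nat) (x w : List Char),
    x.take m = w.take m → m ≤ x.length → m ≤ w.length →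
    ¬(m < x.length ∧ m < w.length ∧ x[m]? = w[m]?) → cpl x w = m := by
  intro m
  induction m with
  | zero =>
    intro x w _ _ _ hstop
    cases x with
    | nil => rfl
    | cons a x =>
      cases w with
      | nil => exact cpl_nil_right _
      | cons b w =>
        simp only [cpl]
        have : a ≠ b := by
          intro hab; exact hstop ⟨by simp, by simp, by simp [hab]⟩
        simp [this]
  | succ m ih =>
    intro x w ht hx hw hstop
    cases x with
    | nil => simp at hx
    | cons a x =>
      cases w with
      | nil => simp at hw
      | cons b w =>
        simp only [List.take_succ_cons, List.cons.injEq] at ht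
        obtain ⟨rfl, ht⟩ := ht
        rw [cpl, if_pos rfl]
        have : cpl x w = m := by
          apply ih x w ht (by simpa using hx) (by simpa using hw)
          intro ⟨h1, h2, h3⟩
          exact hstop ⟨by simpa using h1, by simpa using h2, by simpa using h3⟩
        omega

-- ----- A's inner loop computes cpl -----
theorem pvAMatchLoop_eq (s w : List Char) (i : Nat) : ∀ j,
    pvAMatchLoop s w i j = j + cpl (s.drop (i + j)) (w.drop j) := by
  intro j
  induction hn : w.length - j using Nat.strong_induction_on generalizing j with
  | _ n ih =>
    rw [pvAMatchLoop]
    split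
    · rename_i h
      obtain ⟨hj, hij, hc⟩ := h
      have hrec := ih (w.length - (j + 1)) (by omega) (j + 1) rfl
      rw [hrec]
      have hds : s.drop (i + j) = s[i + j] :: s.drop (i + j + 1) :=
        List.drop_eq_getElem_cons hij
      have hdw : w.drop j = w[j] :: w.drop (j + 1) :=
        List.drop_eq_getElem_cons hj
      have hab : s[i + j] = w[j] := by
        have h1 : s[i + j]? = some s[i + j] := List.getElem?_eq_getElem hij
        have h2 : w[j]? = some w[j] := List.getElem?_eq_getElem hj
        rw [h1, h2] at hc; exact Option.some.inj hc
      rw [hds, hdw, cpl, if_pos hab]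
      have : i + j + 1 = i + (j + 1) := by omega
      rw [this]
      omega
    · rename_i h
      push Not at h
      by_cases hj : j < w.length
      · by_cases hij : i + j < s.length
        · have hc := h hj hij
          have hds : s.drop (i + j) = s[i + j] :: s.drop (i + j + 1) :=
            List.drop_eq_getElem_cons hij
          have hdw : w.drop j = w[j] :: w.drop (j + 1) :=
            List.drop_eq_getElem_cons hj
          have hab : s[i + j] ≠ w[j] := by
            intro hab
            apply hc
            rw [List.getElem?_eq_getElem hij, List.getElem?_eq_getElem hj, hab]
          rw [hds, hdw]
          simp [cpl, hab]
        · have : s.drop (i + j) = [] := List.drop_eq_nil_of_le (by omega)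
          simp [this, cpl]
      · have : w.drop j = [] := List.drop_eq_nil_of_le (by omega)
        simp [this, cpl_nil_right]

-- ----- B's naive pattern Z-loop computes cpl -----
theorem pvBLcpLoop_eq (w : List Char) (k : Nat) : ∀ j,
    pvBLcpLoop w k j = j + cpl (w.drop (k + j)) (w.drop j) := by
  intro j
  induction hn : w.length - j using Nat.strong_induction_on generalizing j with
  | _ n ih =>
    rw [pvBLcpLoop]
    split
    · rename_i h
      obtain ⟨hij, hj, hc⟩ := h
      have hrec := ih (w.length - (j + 1)) (by omega) (j + 1) rfl
      rw [hrec]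
      have hds : w.drop (k + j) = w[k + j] :: w.drop (k + j + 1) :=
        List.drop_eq_getElem_cons hij
      have hdw : w.drop j = w[j] :: w.drop (j + 1) :=
        List.drop_eq_getElem_cons hj
      have hab : w[k + j] = w[j] := by
        have h1 : w[k + j]? = some w[k + j] := List.getElem?_eq_getElem hij
        have h2 : w[j]? = some w[j] := List.getElem?_eq_getElem hj
        rw [h1, h2] at hc; exact Option.some.inj hc
      rw [hds, hdw, cpl, if_pos hab]
      have : k + j + 1 = k + (j + 1) := by omega
      rw [this]
      omega
    · rename_i h
      push Not at h
      by_cases hij : k + j < w.length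
      · by_cases hj : j < w.length
        · have hc := h hij hj
          have hds : w.drop (k + j) = w[k + j] :: w.drop (k + j + 1) :=
            List.drop_eq_getElem_cons hij
          have hdw : w.drop j = w[j] :: w.drop (j + 1) :=
            List.drop_eq_getElem_cons hj
          have hab : w[k + j] ≠ w[j] := by
            intro hab
            apply hc
            rw [List.getElem?_eq_getElem hij, List.getElem?_eq_getElem hj, hab]
          rw [hds, hdw]
          simp [cpl, hab]
        · have : w.drop j = [] := List.drop_eq_nil_of_le (by omega)
          simp [this, cpl_nil_right]
      · have : w.drop (k + j) = [] := List.drop_eq_nil_of_le (by omega)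
        simp [this, cpl]

-- ----- the window-extension loop reaches l + cpl(s[l:], w) from a valid window -----
theorem pvBExtLoop_eq (s w : List Char) (l : Nat) : ∀ r, l ≤ r → r ≤ s.length →
    r - l ≤ w.length → (s.drop l).take (r - l) = w.take (r - l) →
    pvBExtLoop s w l r = l + cpl (s.drop l) w := by
  intro r
  induction hn : s.length - r using Nat.strong_induction_on generalizing r with
  | _ n ih =>
    intro hlr hr hw hpre
    rw [pvBExtLoop]
    split
    · rename_i h
      obtain ⟨hrs, hrw, hc⟩ := h
      apply ih (s.length - (r + 1)) (by omega) (r + 1) rfl (by omega) (by omega) (by omega)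
      have hget : (s.drop l)[r - l]? = w[r - l]? := by
        rw [List.getElem?_drop]
        have : l + (r - l) = r := by omega
        rw [this]; exact hc
      have h1 : (s.drop l).take (r + 1 - l) = (s.drop l).take (r - l) ++ (s.drop l)[r - l]?.toList := by
        have : r + 1 - l = (r - l) + 1 := by omega
        rw [this, List.take_add_one]
      have h2 : w.take (r + 1 - l) = w.take (r - l) ++ w[r - l]?.toList := by
        have : r + 1 - l = (r - l) + 1 := by omega
        rw [this, List.take_add_one]
      rw [h1, h2, hpre, hget]
    · rename_i h
      push Not at h
      have : cpl (s.drop l) w = r - l := by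
        apply cpl_eq_of_stop (r - l) _ _ hpre
        · rw [List.length_drop]; omega
        · exact hw
        · intro ⟨h1, h2, h3⟩
          rw [List.length_drop] at h1
          have hrs : r < s.length := by omega
          have h3' : s[r]? = w[r - l]? := by
            rw [List.getElem?_drop] at h3
            have : l + (r - l) = r := by omega
            rw [this] at h3; exact h3
          exact absurd h3' (h hrs h2)
      omega

-- ----- the matching-statistics loop produces the table of cpl values -----
theorem pvBMsLoop_eq (s w : List Char) (z : List Nat)
    (hz : ∀ k, k < w.length → z.getD k 0 = cpl (w.drop k) w) :
    ∀ i l r acc, l ≤ i → l ≤ r → r ≤ s.length → r - l ≤ w.length →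
    (s.drop l).take (r - l) = w.take (r - l) →
    pvBMsLoop s w z i l r acc =
      acc ++ (List.range' i (s.length - i)).map (fun t => cpl (s.drop t) w) := by
  intro i
  induction hn : s.length - i using Nat.strong_induction_on generalizing i with
  | _ n ih =>
    intro l r acc hli hlr hr hw hpre
    rw [pvBMsLoop]
    by_cases his : i < s.length
    · rw [if_pos his]
      have hrange : List.range' i (s.length - i) = i :: List.range' (i + 1) (s.length - (i + 1)) := by
        have h1 : s.length - i = (s.length - (i + 1)) + 1 := by omega
        rw [h1, List.range'_succ]
      -- the two windows agree: s[i:] vs w[i-l:] on the first r-i characters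
      have hwindow : i < r → (s.drop i).take (r - i) = (w.drop (i - l)).take (r - i) := by
        intro hir
        have := congrArg (List.drop (i - l)) hpre
        rw [List.drop_take, List.drop_take, List.drop_drop] at this
        have e1 : l + (i - l) = i := by omega
        have e2 : r - l - (i - l) = r - i := by omega
        rw [e1, e2] at this
        exact this
      split
      · rename_i hcond
        obtain ⟨hir, hzlt⟩ := hcond
        have hkw : i - l < w.length := by omega
        have hzv : z.getD (i - l) 0 = cpl (w.drop (i - l)) w := hz _ hkw
        have hcpl : cpl (s.drop i) w = z.getD (i - l) 0 := by
          rw [hzv]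
          exact cpl_stable (w.drop (i - l)) (s.drop i) w (r - i) (hwindow hir) (by omega)
        rw [ih (s.length - (i + 1)) (by omega) (i + 1) rfl l r _ (by omega) hlr hr hw hpre]
        rw [← hn, hrange]
        simp [hcpl]
      · rename_i hcond
        push Not at hcond
        have hpre' : (s.drop i).take (max r i - i) = w.take (max r i - i) := by
          by_cases hir : i < r
          · have hmax : max r i = r := by omega
            rw [hmax]
            have hzge : r - i ≤ z.getD (i - l) 0 := hcond hir
            have hkw : i - l < w.length := by omega
            rw [hz _ hkw] at hzge
            calc (s.drop i).take (r - i) = (w.drop (i - l)).take (r - i) := hwindow hir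
              _ = w.take (r - i) := by
                  rw [take_eq_of_le_cpl (w.drop (i - l)) w (r - i) hzge]
          · have hmax : max r i = i := by omega
            simp [hmax]
        have hext : pvBExtLoop s w i (max r i) = i + cpl (s.drop i) w := by
          apply pvBExtLoop_eq s w i (max r i) (le_max_right r i) (by omega) (by omega) hpre'
        have hcle : cpl (s.drop i) w ≤ s.length - i := by
          have := cpl_le_left (s.drop i) w
          rw [List.length_drop] at this; exact this
        rw [ih (s.length - (i + 1)) (by omega) (i + 1) rfl i (pvBExtLoop s w i (max r i)) _
            (by omega) (by rw [hext]; omega) (by rw [hext]; omega)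
            (by rw [hext]; have := cpl_le_right (s.drop i) w; omega)
            (by rw [hext]
                have : i + cpl (s.drop i) w - i = cpl (s.drop i) w := by omega
                rw [this]
                exact cpl_take (s.drop i) w)]
        rw [← hn, hrange]
        simp [hext]
    · rw [if_neg his]
      rw [← hn]
      have : s.length - i = 0 := by omega
      simp [this]

theorem pvBMatchStats_getD (s w : List Char) (i : Nat) (hi : i < s.length) :
    (pvBMatchStats s w).getD i 0 = cpl (s.drop i) w := by
  unfold pvBMatchStats
  rw [pvBMsLoop_eq s w _ ?_ 0 0 0 [] (by omega) (by omega) (by omega) (by omega) (by simp)]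
  · rw [Nat.sub_zero, List.nil_append, List.getD, ← List.range_eq_range', List.getElem?_map,
      List.getElem?_range hi]
    rfl
  · intro k hk
    rw [List.getD, List.getElem?_map, List.getElem?_range hk]
    simp only [Option.map_some, Option.getD_some]
    rw [pvBLcpLoop_eq w k 0]
    simp

-- ----- the two walks agree step by step -----
theorem pvGo_eq (s w rw : List Char) (n : Nat) (F R : List Nat)
    (hF : ∀ t, t < s.length → F.getD t 0 = pvAMatchLoop s w t 0)
    (hR : ∀ t, t < s.length → R.getD t 0 = pvAMatchLoop s rw t 0) :
    ∀ fuel i ct, pvBGo s n F R fuel i ct = pvAGo s w rw n fuel i ct := by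
  intro fuel
  induction fuel with
  | zero => intro i ct; rfl
  | succ fuel ih =>
    intro i ct
    rw [pvBGo, pvAGo]
    by_cases his : i < s.length
    · rw [if_pos his, if_pos his]
      simp only [hF i his, hR i his]
      split <;> split <;> exact ih _ _
    · rw [if_neg his, if_neg his]

-- ===== VERDICT (by name: the statement is the Claim_ definition above) =====
theorem substringOrReverseSubstringCount_spec : Claim_equal_substringOrReverseSubstringCount := by
  intro sInput sSearchWord _
  unfold Spec_substringOrReverseSubstringCount
  unfold substringOrReverseSubstringCount substringOrReverseSubstringCount_alt
  apply Eq.symm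
  apply pvGo_eq
  · intro t ht
    rw [pvBMatchStats_getD _ _ t ht, pvAMatchLoop_eq]
    simp
  · intro t ht
    rw [pvBMatchStats_getD _ _ t ht, pvAMatchLoop_eq]
    simp
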